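-- pv_equiv track=rewrite | github.com/HelpMyNewsletter/latestedition | scripts/generate_latest.py | strip_beehiiv_footer
-- ===== SOURCE A (Python) =====
-- def strip_beehiiv_footer(html: str) -> str:
--     markers = [
--         "powered by beehiiv",
--         "published with beehiiv",
--         "unsubscribe",
--         "manage your subscription",
--     ]
--
--     lower_html = html.lower()
--
--     found_indexes = [
--         lower_html.find(marker)
--         for marker in markers
--         if lower_html.find(marker) != -1
--     ]
--
--     if found_indexes:
--         return html[:min(found_indexes)]
--
--     return html
-- ===== SOURCE B (Python) =====
-- import re
--
-- _FOOTER_RE = re.compile(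
--     "|".join(
--         re.escape(m)
--         for m in [
--             "powered by beehiiv",
--             "published with beehiiv",
--             "unsubscribe",
--             "manage your subscription",
--         ]
--     ),
--     re.IGNORECASE,
-- )
--
--
-- def strip_beehiiv_footer(html: str) -> str:
--     m = _FOOTER_RE.search(html)
--     return html[: m.start()] if m else html
-- ===== Notes on version B (the rewrite author's own statement) =====
-- stated objective: idiomatic
-- what changed: Replaces the four separate lower-case .find() passes plus min() with one compiled case-insensitive alternation regex whose single leftmost re.search gives the cut position directly.
import Mathlib
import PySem

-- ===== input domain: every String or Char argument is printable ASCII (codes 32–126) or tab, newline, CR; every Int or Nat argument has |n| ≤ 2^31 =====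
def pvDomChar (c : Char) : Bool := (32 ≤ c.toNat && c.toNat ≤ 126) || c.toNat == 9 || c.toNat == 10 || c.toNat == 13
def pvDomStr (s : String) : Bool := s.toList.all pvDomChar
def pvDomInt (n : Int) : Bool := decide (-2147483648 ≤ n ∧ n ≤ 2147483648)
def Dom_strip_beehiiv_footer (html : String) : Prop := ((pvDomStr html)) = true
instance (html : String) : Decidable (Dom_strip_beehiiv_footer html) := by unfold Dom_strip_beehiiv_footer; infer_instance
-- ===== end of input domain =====

-- B replaces A's four per-marker .find() passes + min() with one combined left-to-right
-- case-insensitive scan (a compiled alternation regex in Python); idiomatic, same result.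

-- ===== PORT A =====
def strip_beehiiv_footer (html : String) : String :=
  let markers : List String :=
    ["powered by beehiiv", "published with beehiiv", "unsubscribe", "manage your subscription"]
  let lower_html := PySem.Str.lower html
  let found_indexes : List Int := markers.filterMap (fun marker =>
    if PySem.Str.find lower_html marker ≠ -1 then some (PySem.Str.find lower_html marker) else none)
  match PySem.List.min? found_indexes (fun x => x) with
  | some m => PySem.Str.slice html none (some m)   -- found_indexes nonempty: html[:min(found_indexes)]
  | none => html                                    -- found_indexes empty

-- ===== PORT B =====
-- B-side helper: the alternation regex's literal branches, lower-cased (re.IGNORECASE on the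
-- ASCII markers = compare against html.lower(); exact on the stated ASCII domain).
def pvAltMarkers : List (List Char) :=
  ["powered by beehiiv".toList, "published with beehiiv".toList,
   "unsubscribe".toList, "manage your subscription".toList]

-- B-side helper: hand port of re.search over an alternation of escaped literals — one
-- left-to-right scan returning the leftmost position where any branch matches (exact:
-- leftmost-match of an alternation of literals is the first position with a literal match).
def pvAltScan (ms : List (List Char)) : List Char → Nat → Option Nat
  | [], i => if ms.any (fun m => m.isPrefixOf ([] : List Char)) then some i else none
  | c :: rest, i =>
      if ms.any (fun m => m.isPrefixOf (c :: rest)) then some i else pvAltScan ms rest (i + 1)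

def strip_beehiiv_footer_alt (html : String) : String :=
  match pvAltScan pvAltMarkers (PySem.Chars.lower html.toList) 0 with
  | some i => String.ofList (html.toList.take i)   -- html[:m.start()]
  | none => html

-- ===== PRECONDITION & SPEC =====
def Spec_strip_beehiiv_footer (html : String) (out : String) : Prop := out = strip_beehiiv_footer_alt html
instance (html : String) (out : String) : Decidable (Spec_strip_beehiiv_footer html out) := by unfold Spec_strip_beehiiv_footer; infer_instance

-- ===== CLAIM (what is proved, stated in full; the proofs are below) =====
def Claim_equal_strip_beehiiv_footer : Prop := ∀ (html : String), Dom_strip_beehiiv_footer html → Spec_strip_beehiiv_footer html (strip_beehiiv_footer html)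

-- ===== LEMMAS AND PROOFS =====

lemma pvAltScan_eq_none_iff (ms : List (List Char)) (s : List Char) (i : Nat) :
    pvAltScan ms s i = none ↔ ∀ j, ¬ (ms.any (fun m => m.isPrefixOf (s.drop j)) = true) := by
  induction s generalizing i with
  | nil =>
      rw [show pvAltScan ms [] i
            = (if ms.any (fun m => m.isPrefixOf ([] : List Char)) then some i else none) from rfl]
      simp only [List.drop_nil]
      split_ifs with h
      · exact iff_of_false (by simp) (fun hall => hall 0 h)
      · exact iff_of_true rfl (fun _ => h)
  | cons c rest ih =>
      rw [show pvAltScan ms (c :: rest) i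
            = (if ms.any (fun m => m.isPrefixOf (c :: rest)) then some i
               else pvAltScan ms rest (i + 1)) from rfl]
      split_ifs with h
      · exact iff_of_false (by simp) (fun hall => by simpa using hall 0 h)
      · rw [ih]
        constructor
        · intro hall j
          cases j with
          | zero => simpa using h
          | succ j' => simpa using hall j'
        · intro hall j
          simpa using hall (j + 1)

lemma pvAltScan_eq_some (ms : List (List Char)) (s : List Char) (i k : Nat)
    (h : pvAltScan ms s i = some k) :
    i ≤ k ∧ (ms.any (fun m => m.isPrefixOf (s.drop (k - i))) = true) ∧
      ∀ j < k - i, ¬ (ms.any (fun m => m.isPrefixOf (s.drop j)) = true) := by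
  induction s generalizing i with
  | nil =>
      rw [show pvAltScan ms [] i
            = (if ms.any (fun m => m.isPrefixOf ([] : List Char)) then some i else none) from rfl] at h
      by_cases hm : ms.any (fun m => m.isPrefixOf ([] : List Char)) = true
      · rw [if_pos hm] at h
        cases h
        refine ⟨le_rfl, ?_, ?_⟩
        · simpa using hm
        · intro j hj; omega
      · rw [if_neg hm] at h
        cases h
  | cons c rest ih =>
      rw [show pvAltScan ms (c :: rest) i
            = (if ms.any (fun m => m.isPrefixOf (c :: rest)) then some i
               else pvAltScan ms rest (i + 1)) from rfl] at h
      split_ifs at h with hm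
      · cases h
        refine ⟨le_rfl, ?_, ?_⟩
        · simpa using hm
        · intro j hj; omega
      · obtain ⟨hle, hmatch, hmin⟩ := ih (i + 1) h
        refine ⟨by omega, ?_, ?_⟩
        · have : (c :: rest).drop (k - i) = rest.drop (k - (i + 1)) := by
            have hki : k - i = (k - (i + 1)) + 1 := by omega
            simp [hki]
          rwa [this]
        · intro j hj
          cases j with
          | zero => simpa using hm
          | succ j' =>
              have := hmin j' (by omega)
              simpa using this

-- A match at some position ↔ some marker is an infix.
lemma pvMatch_exists_iff (m s : List Char) :
    (∃ j, m <+: s.drop j) ↔ m <:+: s :=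
  (PySem.Chars.exists_prefix_drop_iff_isIn m s).trans (PySem.Chars.isIn_iff_infix m s)

lemma pvAny_iff (ms : List (List Char)) (s : List Char) (j : Nat) :
    (ms.any (fun m => m.isPrefixOf (s.drop j)) = true) ↔ ∃ m ∈ ms, m <+: s.drop j := by
  simp [List.any_eq_true, List.isPrefixOf_iff_prefix]

-- ===== VERDICT (by name: the statement is the Claim_ definition above) =====
theorem strip_beehiiv_footer_spec : Claim_equal_strip_beehiiv_footer := by
  intro html _
  unfold Spec_strip_beehiiv_footer strip_beehiiv_footer strip_beehiiv_footer_alt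
  simp only []
  set L : List Char := PySem.Chars.lower html.toList with hL
  set markers : List String :=
    ["powered by beehiiv", "published with beehiiv", "unsubscribe", "manage your subscription"] with hmk
  have hml : pvAltMarkers = markers.map String.toList := by
    simp [pvAltMarkers, hmk]
  have hlow : (PySem.Str.lower html).toList = L := by
    simp [hL]
  -- per-marker find is over L
  have hfind : ∀ mk : String, PySem.Str.find (PySem.Str.lower html) mk = PySem.Chars.find L mk.toList := by
    intro mk
    simp [PySem.Str.find_eq, hlow]
  set found : List Int := markers.filterMap (fun marker =>
    if PySem.Str.find (PySem.Str.lower html) marker ≠ -1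
    then some (PySem.Str.find (PySem.Str.lower html) marker) else none) with hfound
  rcases hscan : pvAltScan pvAltMarkers L 0 with _ | k
  · -- no match: every marker absent, found = [], min? = none
    have hnone : ∀ j, ¬ (pvAltMarkers.any (fun m => m.isPrefixOf (L.drop j)) = true) :=
      (pvAltScan_eq_none_iff _ _ _).mp hscan
    have habsent : ∀ mk ∈ markers, ¬ (mk.toList <:+: L) := by
      intro mk hmk' hin
      obtain ⟨j, hj⟩ := (pvMatch_exists_iff mk.toList L).mpr hin
      exact hnone j ((pvAny_iff _ _ _).mpr ⟨mk.toList, hml ▸ List.mem_map.mpr ⟨mk, hmk', rfl⟩, hj⟩)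
    have hfound_nil : found = [] := by
      rw [hfound]
      apply List.filterMap_eq_nil_iff.mpr
      intro mk hmk'
      have : PySem.Chars.find L mk.toList = -1 :=
        (PySem.Chars.find_eq_neg_one_iff L mk.toList).mpr (habsent mk hmk')
      simp only [hfind, this, ne_eq, not_true_eq_false, reduceIte]
    rw [hfound_nil]
    simp [PySem.List.min?]
  · -- match at k
    obtain ⟨-, hmatch, hmin⟩ := pvAltScan_eq_some _ _ _ _ hscan
    simp only [Nat.sub_zero] at hmatch hmin
    obtain ⟨m0, hm0mem, hm0pre⟩ := (pvAny_iff _ _ _).mp hmatch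
    obtain ⟨mk0, hmk0mem, hmk0eq⟩ := by
      rw [hml] at hm0mem; exact List.mem_map.mp hm0mem
    -- find of mk0 equals k
    have hm0inf : m0 <:+: L := (pvMatch_exists_iff m0 L).mp ⟨k, hm0pre⟩
    have hf0nonneg : 0 ≤ PySem.Chars.find L m0 := (PySem.Chars.find_nonneg_iff L m0).mpr hm0inf
    obtain ⟨hfpre, hfleast⟩ := PySem.Chars.find_spec hf0nonneg
    have hle1 : (PySem.Chars.find L m0).toNat ≤ k := by
      by_contra hgt
      exact hfleast k (by omega) hm0pre
    have hge1 : k ≤ (PySem.Chars.find L m0).toNat := by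
      by_contra hgt
      exact hmin (PySem.Chars.find L m0).toNat (by omega)
        ((pvAny_iff _ _ _).mpr ⟨m0, hm0mem, hfpre⟩)
    have hfk : PySem.Chars.find L m0 = (k : Int) := by omega
    -- k is a member of found
    have hkmem : (k : Int) ∈ found := by
      rw [hfound]
      apply List.mem_filterMap.mpr
      refine ⟨mk0, hmk0mem, ?_⟩
      rw [hfind, hmk0eq, hfk]
      simp
    -- k is a lower bound of found
    have hlb : ∀ y ∈ found, (k : Int) ≤ y := by
      intro y hy
      rw [hfound] at hy
      obtain ⟨mk, hmkmem, hmkval⟩ := List.mem_filterMap.mp hy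
      rw [hfind] at hmkval
      by_cases hne : PySem.Chars.find L mk.toList = -1
      · simp [hne] at hmkval
      · rw [if_pos (by simpa using hne)] at hmkval
        rw [Option.some_inj] at hmkval
        subst hmkval
        have hynn : 0 ≤ PySem.Chars.find L mk.toList :=
          (PySem.Chars.find_nonneg_iff L mk.toList).mpr
            ((PySem.Chars.find_ne_neg_one_iff L mk.toList).mp hne)
        obtain ⟨hpre, -⟩ := PySem.Chars.find_spec hynn
        have : k ≤ (PySem.Chars.find L mk.toList).toNat := by
          by_contra hgt
          exact hmin (PySem.Chars.find L mk.toList).toNat (by omega)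
            ((pvAny_iff _ _ _).mpr ⟨mk.toList, hml ▸ List.mem_map.mpr ⟨mk, hmkmem, rfl⟩, hpre⟩)
        omega
    -- min? found = some k
    rcases hmq : PySem.List.min? found (fun x => x) with _ | mv
    · have hnil : found = [] := (PySem.List.min?_eq_none_iff found (fun x => x)).mp hmq
      rw [hnil] at hkmem
      exact absurd hkmem (List.not_mem_nil)
    · have hmem := PySem.List.min?_mem hmq
      have h1 : mv ≤ (k : Int) := PySem.List.min?_isMin hmq _ hkmem
      have h2 : (k : Int) ≤ mv := hlb mv hmem
      have hmv : mv = (k : Int) := le_antisymm h1 h2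
      -- both sides: html[:k]
      apply String.toList_inj.mp
      rw [hmv]
      simp [PySem.Str.toList_slice, PySem.Chars.slice_eq_listSlice, PySem.List.slice_to_natCast]
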